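-- pv_equiv track=rewrite | github.com/llww0516/LSHFSP-AGV | HFSP_AGV_MDDQN_NSGA2_240224.py | Zuixiaojuli_Top20
-- ===== SOURCE A (Python) =====
-- def Zuixiaojuli_Top20(make_span3D, Idle_time3D, Agv_S3D):
--     lst = []
--     for i in range(len(make_span3D)):
--         lst.append((make_span3D[i]-min(make_span3D))**2 + (Idle_time3D[i]-min(Idle_time3D))**2 + (Agv_S3D[i]-min(Agv_S3D))**2)
--     # sorted_lst = sorted(lst)
--     # top_20 = sorted_lst[:20]
--     # top_20_indices = [lst.index(x) for x in top_20]
--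
--     top_20_indices = []
--     indexed_lst = list(enumerate(lst))
--     sorted_lst = sorted(indexed_lst, key=lambda x: x[1])
--     top_20_elements = sorted_lst[:20]
--     for index, value in top_20_elements:
--         top_20_indices.append(index)
--
--     top_20_make_span3D = [make_span3D[x] for x in top_20_indices]
--     top_20_Idle_time3D = [Idle_time3D[x] for x in top_20_indices]
--     top_20_Agv_S3D = [Agv_S3D[x] for x in top_20_indices]
--     return top_20_make_span3D, top_20_Idle_time3D, top_20_Agv_S3D
-- ===== SOURCE B (Python) =====
-- def Zuixiaojuli_Top20(make_span3D, Idle_time3D, Agv_S3D):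
--     # Bounded selection: keep only the 20 best (distance, index) entries in a
--     # sorted buffer instead of sorting the whole index set.
--     if not make_span3D:
--         return [], [], []
--     m1 = min(make_span3D)
--     m2 = min(Idle_time3D)
--     m3 = min(Agv_S3D)
--     best = []  # ascending by (distance, index), at most 20 entries, payload carried along
--     for i, (a, b, c) in enumerate(zip(make_span3D, Idle_time3D, Agv_S3D)):
--         d = (a - m1) ** 2 + (b - m2) ** 2 + (c - m3) ** 2
--         j = len(best)
--         while j > 0 and best[j - 1][0] > (d, i):
--             j -= 1
--         best.insert(j, ((d, i), (a, b, c)))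
--         del best[20:]
--     return ([t[0] for _, t in best],
--             [t[1] for _, t in best],
--             [t[2] for _, t in best])
-- ===== Notes on version B (the rewrite author's own statement) =====
-- stated objective: faster
-- what changed: B computes the three minima once and keeps only the 20 best (distance,index) entries with their payload in a bounded sorted buffer during a single pass, instead of re-computing min(list) inside the loop and fully sorting all n indexed distances.
import Mathlib
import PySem

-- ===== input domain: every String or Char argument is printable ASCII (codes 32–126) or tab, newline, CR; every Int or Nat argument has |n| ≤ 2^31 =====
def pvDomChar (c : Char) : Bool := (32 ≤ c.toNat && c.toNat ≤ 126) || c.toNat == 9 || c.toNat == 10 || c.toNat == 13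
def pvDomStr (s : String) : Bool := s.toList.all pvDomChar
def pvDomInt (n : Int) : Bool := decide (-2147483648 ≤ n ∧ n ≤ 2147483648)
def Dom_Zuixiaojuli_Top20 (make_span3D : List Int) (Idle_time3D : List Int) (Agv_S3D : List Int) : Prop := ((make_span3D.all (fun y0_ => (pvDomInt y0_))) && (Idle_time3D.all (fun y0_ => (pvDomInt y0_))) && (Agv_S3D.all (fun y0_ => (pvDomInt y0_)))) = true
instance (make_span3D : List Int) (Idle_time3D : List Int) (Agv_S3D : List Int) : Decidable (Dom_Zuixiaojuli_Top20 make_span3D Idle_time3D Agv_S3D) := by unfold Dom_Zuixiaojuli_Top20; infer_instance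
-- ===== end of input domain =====

-- B replaces A's quadratic loop (min(list) re-computed every iteration) and full sort of all
-- indexed distances by a one-pass bounded sorted buffer of the 20 best (distance, index) entries
-- carrying their payload; objective: faster.

-- Python's min(xs) (no key); both Pythons call it. Exact for xs ≠ [] (Python raises on []).
def pvMin (xs : List Int) : Int := (PySem.List.min? xs (fun x => x)).getD 0

-- ===== PORT A =====
def Zuixiaojuli_Top20 (make_span3D : List Int) (Idle_time3D : List Int) (Agv_S3D : List Int) : List (List Int) :=
  -- for i in range(len(make_span3D)): lst.append(...)  (min(...) re-evaluated each iteration)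
  let lst := (PySem.List.pyRange 0 (make_span3D.length : Int)).foldl (fun acc i =>
      acc ++ [(PySem.List.pyGetD make_span3D i 0 - pvMin make_span3D) ^ 2
            + (PySem.List.pyGetD Idle_time3D i 0 - pvMin Idle_time3D) ^ 2
            + (PySem.List.pyGetD Agv_S3D i 0 - pvMin Agv_S3D) ^ 2]) []
  let indexed_lst := PySem.List.enumerate lst
  let sorted_lst := PySem.List.sorted indexed_lst (fun x => x.2)
  let top_20_elements := sorted_lst.take 20
  let top_20_indices := top_20_elements.foldl (fun acc p => acc ++ [p.1]) []
  [top_20_indices.map (fun x => PySem.List.pyGetD make_span3D x 0),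
   top_20_indices.map (fun x => PySem.List.pyGetD Idle_time3D x 0),
   top_20_indices.map (fun x => PySem.List.pyGetD Agv_S3D x 0)]

-- ===== PORT B =====
-- lexicographic '<' on Python pairs (d, i)
def pvKeyLt (x y : Int × Int) : Bool := decide (x.1 < y.1) || (x.1 == y.1 && decide (x.2 < y.2))

-- Source B's while-loop inserts the new entry after the last buffer entry whose key is ≤ the new
-- key; on the (always sorted) buffer that is the position before the first strictly greater
-- key, which is the position this left-to-right scan finds.
def pvInsB (x : (Int × Int) × Int × Int × Int) :
    List ((Int × Int) × Int × Int × Int) → List ((Int × Int) × Int × Int × Int)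
  | [] => [x]
  | y :: ys => if pvKeyLt x.1 y.1 then x :: y :: ys else y :: pvInsB x ys

def Zuixiaojuli_Top20_alt (make_span3D : List Int) (Idle_time3D : List Int) (Agv_S3D : List Int) : List (List Int) :=
  if make_span3D = [] then [[], [], []] else
  let m1 := pvMin make_span3D
  let m2 := pvMin Idle_time3D
  let m3 := pvMin Agv_S3D
  let best := (PySem.List.enumerate (make_span3D.zip (Idle_time3D.zip Agv_S3D))).foldl
    (fun best p =>
      let d := (p.2.1 - m1) ^ 2 + (p.2.2.1 - m2) ^ 2 + (p.2.2.2 - m3) ^ 2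
      (pvInsB ((d, p.1), (p.2.1, p.2.2.1, p.2.2.2)) best).take 20) []
  [best.map (fun q => q.2.1), best.map (fun q => q.2.2.1), best.map (fun q => q.2.2.2)]

-- ===== PRECONDITION & SPEC =====
-- Pre_ excludes exactly the inputs on which Python A raises: IndexError when one of the other
-- two lists is shorter than make_span3D (also covering ValueError of min([]) on an empty one).
def Pre_Zuixiaojuli_Top20 (make_span3D : List Int) (Idle_time3D : List Int) (Agv_S3D : List Int) : Prop :=
  make_span3D.length ≤ Idle_time3D.length ∧ make_span3D.length ≤ Agv_S3D.length
instance (make_span3D : List Int) (Idle_time3D : List Int) (Agv_S3D : List Int) : Decidable (Pre_Zuixiaojuli_Top20 make_span3D Idle_time3D Agv_S3D) := by unfold Pre_Zuixiaojuli_Top20; infer_instance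

def pvWitness_Zuixiaojuli_Top20 : List Int × List Int × List Int := ([3, 1, 2], [5, 4, 6], [7, 9, 8])

def Spec_Zuixiaojuli_Top20 (make_span3D : List Int) (Idle_time3D : List Int) (Agv_S3D : List Int) (out : List (List Int)) : Prop := out = Zuixiaojuli_Top20_alt make_span3D Idle_time3D Agv_S3D
instance (make_span3D : List Int) (Idle_time3D : List Int) (Agv_S3D : List Int) (out : List (List Int)) : Decidable (Spec_Zuixiaojuli_Top20 make_span3D Idle_time3D Agv_S3D out) := by unfold Spec_Zuixiaojuli_Top20; infer_instance

-- ===== CLAIM (what is proved, stated in full; the proofs are below) =====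
def Claim_equal_Zuixiaojuli_Top20 : Prop := ∀ (make_span3D : List Int) (Idle_time3D : List Int) (Agv_S3D : List Int), Dom_Zuixiaojuli_Top20 make_span3D Idle_time3D Agv_S3D → Pre_Zuixiaojuli_Top20 make_span3D Idle_time3D Agv_S3D → Spec_Zuixiaojuli_Top20 make_span3D Idle_time3D Agv_S3D (Zuixiaojuli_Top20 make_span3D Idle_time3D Agv_S3D)

-- ===== LEMMAS AND PROOFS =====

-- the j-th squared distance, and the j-th buffer entry of B
def pvD (ms it ag : List Int) (j : Nat) : Int :=
  (ms.getD j 0 - pvMin ms) ^ 2 + (it.getD j 0 - pvMin it) ^ 2 + (ag.getD j 0 - pvMin ag) ^ 2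

def pvE (ms it ag : List Int) (j : Nat) : (Int × Int) × Int × Int × Int :=
  ((pvD ms it ag j, (j : Int)), (ms.getD j 0, it.getD j 0, ag.getD j 0))

-- projection from a B-buffer entry to A's (index, distance) pair
def pvG (e : (Int × Int) × Int × Int × Int) : Int × Int := (e.1.2, e.1.1)

theorem pvEnumRange {α : Type} (F : Nat → α) (n : Nat) :
    PySem.List.enumerate ((List.range n).map F) 0 = (List.range n).map (fun (j : Nat) => ((j : Int), F j)) := by
  induction n with
  | zero => rfl
  | succ n ih =>
    rw [List.range_succ, List.map_append, PySem.List.enumerate_append, ih, List.map_append]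
    simp [PySem.List.enumerate_cons]

-- take k commutes with bounded insertion
theorem pvInsB_take (x : (Int × Int) × Int × Int × Int) (s : List ((Int × Int) × Int × Int × Int)) (k : Nat) :
    (pvInsB x (s.take k)).take k = (pvInsB x s).take k := by
  induction s generalizing k with
  | nil => simp
  | cons y ys ih =>
    cases k with
    | zero => simp
    | succ k =>
      simp only [List.take_succ_cons, pvInsB]
      by_cases h : pvKeyLt x.1 y.1
      · simp only [h, if_true, List.take_succ_cons]
        cases k with
        | zero => simp
        | succ k => simp [List.take_take]
      · simp [h, ih]

theorem pvFold_take (l : List ((Int × Int) × Int × Int × Int)) :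
    ∀ s : List ((Int × Int) × Int × Int × Int),
    List.foldl (fun b e => (pvInsB e b).take 20) (s.take 20) l
      = (List.foldl (fun b e => pvInsB e b) s l).take 20 := by
  induction l with
  | nil => intro s; rfl
  | cons x xs ih =>
    intro s
    simp only [List.foldl_cons]
    rw [pvInsB_take, ← ih (pvInsB x s)]

theorem pvMem_insB {e x : (Int × Int) × Int × Int × Int} {l : List ((Int × Int) × Int × Int × Int)}
    (h : e ∈ pvInsB x l) : e = x ∨ e ∈ l := by
  induction l with
  | nil => simpa [pvInsB] using h
  | cons y ys ih =>
    simp only [pvInsB] at h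
    by_cases hc : pvKeyLt x.1 y.1
    · simp [hc] at h
      rcases h with h | h | h
      exacts [Or.inl h, Or.inr (by simp [h]), Or.inr (by simp [h])]
    · simp [hc] at h
      rcases h with h | h
      · exact Or.inr (by simp [h])
      · rcases ih h with h' | h'
        · exact Or.inl h'
        · exact Or.inr (by simp [h'])

theorem pvMem_fold {e : (Int × Int) × Int × Int × Int} :
    ∀ (l s : List ((Int × Int) × Int × Int × Int)),
    e ∈ List.foldl (fun b x => pvInsB x b) s l → e ∈ s ∨ e ∈ l := by
  intro l
  induction l with
  | nil => intro s h; exact Or.inl h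
  | cons x xs ih =>
    intro s h
    rcases ih (pvInsB x s) h with h' | h'
    · rcases pvMem_insB h' with h'' | h''
      · exact Or.inr (by simp [h''])
      · exact Or.inl h''
    · exact Or.inr (by simp [h'])

-- one insertion step: A's stable insert by distance equals B's lexicographic insert,
-- because every entry already in the buffer has a strictly smaller index
theorem pvIns_step (ms it ag : List Int) (j : Nat)
    (SB : List ((Int × Int) × Int × Int × Int))
    (hSB : ∀ e ∈ SB, ∃ j' : Nat, e = pvE ms it ag j' ∧ j' < j) :
    PySem.List.insertBy (fun a b => decide (a.2 < b.2)) (pvG (pvE ms it ag j)) (SB.map pvG)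
      = (pvInsB (pvE ms it ag j) SB).map pvG := by
  induction SB with
  | nil => rfl
  | cons y ys ih =>
    obtain ⟨j', hy, hj'⟩ := hSB y (by simp)
    have hkey : (decide ((pvG (pvE ms it ag j)).2 < (pvG y).2)) = pvKeyLt (pvE ms it ag j).1 y.1 := by
      subst hy
      simp only [pvG, pvE, pvKeyLt]
      by_cases hd : pvD ms it ag j < pvD ms it ag j'
      · simp [hd]
      · have hne : ¬ ((j : Int) < (j' : Int)) := by exact_mod_cast Nat.not_lt.mpr (Nat.le_of_lt hj')
        by_cases he : pvD ms it ag j = pvD ms it ag j'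
        · simp [he, hne]
        · simp [hd, he]
    simp only [List.map_cons, PySem.List.insertBy, pvInsB, hkey]
    by_cases hc : pvKeyLt (pvE ms it ag j).1 y.1
    · simp [hc]
    · simp only [hc, Bool.false_eq_true, if_false, List.map_cons]
      rw [ih (fun e he => hSB e (by simp [he]))]

-- the two folds stay in pvG-correspondence along any strictly increasing index list
theorem pvFold_parallel (ms it ag : List Int) :
    ∀ (js : List Nat), js.Pairwise (· < ·) →
    ∀ (SB : List ((Int × Int) × Int × Int × Int)),
    (∀ e ∈ SB, ∃ j' : Nat, e = pvE ms it ag j' ∧ ∀ j ∈ js, j' < j) →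
    List.foldl (fun acc x => PySem.List.insertBy (fun a b => decide (a.2 < b.2)) x acc)
        (SB.map pvG) (js.map (fun j => pvG (pvE ms it ag j)))
      = (List.foldl (fun b e => pvInsB e b) SB (js.map (pvE ms it ag))).map pvG := by
  intro js
  induction js with
  | nil => intro _ SB _; rfl
  | cons j js ih =>
    intro hpw SB hSB
    simp only [List.map_cons, List.foldl_cons]
    rw [pvIns_step ms it ag j SB (fun e he => by
      obtain ⟨j', h1, h2⟩ := hSB e he
      exact ⟨j', h1, h2 j (by simp)⟩)]
    apply ih (List.Pairwise.sublist (List.sublist_cons_self j js) hpw)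
    intro e he
    rcases pvMem_insB (x := pvE ms it ag j) (by simpa using he) with h | h
    · exact ⟨j, h, fun j'' hj'' => (List.pairwise_cons.mp hpw).1 j'' hj''⟩
    · obtain ⟨j', h1, h2⟩ := hSB e h
      exact ⟨j', h1, fun j'' hj'' => h2 j'' (by simp [hj''])⟩

-- B's zipped, enumerated input is the entry list over range n
theorem pvInB_eq (ms it ag : List Int)
    (h1 : ms.length ≤ it.length) (h2 : ms.length ≤ ag.length) :
    PySem.List.enumerate (ms.zip (it.zip ag))
      = (List.range ms.length).map (fun (j : Nat) => ((j : Int), (ms.getD j 0, it.getD j 0, ag.getD j 0))) := by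
  have hz : ms.zip (it.zip ag) = (List.range ms.length).map (fun (j : Nat) => ((ms.getD j 0 : Int), it.getD j 0, ag.getD j 0)) := by
    apply List.ext_getElem
    · simp; omega
    · intro k hk1 hk2
      have hkm : k < ms.length := by simpa using hk2
      have hki : k < it.length := by omega
      have hka : k < ag.length := by omega
      simp [List.getElem_zip, List.getD_eq_getElem?_getD, hkm, hki, hka]
  rw [hz]
  exact (pvEnumRange _ _)

-- A's enumerated distance list is the pvG-image of the same entry list
theorem pvInA_eq (ms it ag : List Int) :
    PySem.List.enumerate ((PySem.List.pyRange 0 (ms.length : Int)).foldl (fun acc i =>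
        acc ++ [(PySem.List.pyGetD ms i 0 - pvMin ms) ^ 2
              + (PySem.List.pyGetD it i 0 - pvMin it) ^ 2
              + (PySem.List.pyGetD ag i 0 - pvMin ag) ^ 2]) [])
      = (List.range ms.length).map (fun j => pvG (pvE ms it ag j)) := by
  rw [PySem.List.pyRange_zero_nat, PySem.List.foldl_append_singleton_eq_map, List.nil_append,
    List.map_map]
  have : ((fun i => (PySem.List.pyGetD ms i 0 - pvMin ms) ^ 2
              + (PySem.List.pyGetD it i 0 - pvMin it) ^ 2
              + (PySem.List.pyGetD ag i 0 - pvMin ag) ^ 2) ∘ (fun k : Nat => (k : Int)))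
      = fun j : Nat => pvD ms it ag j := by
    funext j
    simp [Function.comp, PySem.List.pyGetD_natCast, pvD]
  rw [this, pvEnumRange]
  rfl

-- ===== VERDICT (by name: the statement is the Claim_ definition above) =====
theorem Zuixiaojuli_Top20_spec : Claim_equal_Zuixiaojuli_Top20 := by
  intro ms it ag _ hpre
  obtain ⟨h1, h2⟩ := hpre
  unfold Spec_Zuixiaojuli_Top20 Zuixiaojuli_Top20 Zuixiaojuli_Top20_alt
  by_cases hnil : ms = []
  · subst hnil; rfl
  · simp only [hnil, if_false]
    set n := ms.length with hn
    set F := List.foldl (fun b e => pvInsB e b) [] ((List.range n).map (pvE ms it ag)) with hF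
    have hB : (PySem.List.enumerate (ms.zip (it.zip ag))).foldl
        (fun best p =>
          (pvInsB (((p.2.1 - pvMin ms) ^ 2 + (p.2.2.1 - pvMin it) ^ 2 + (p.2.2.2 - pvMin ag) ^ 2, p.1),
            (p.2.1, p.2.2.1, p.2.2.2)) best).take 20) [] = F.take 20 := by
      rw [pvInB_eq ms it ag h1 h2, List.foldl_map]
      have : (fun (best : List ((Int × Int) × Int × Int × Int)) (j : Nat) =>
          (pvInsB (pvE ms it ag j) best).take 20)
          = fun best j => (pvInsB (pvE ms it ag j) best).take 20 := rfl
      calc List.foldl (fun best j =>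
              (pvInsB (((((ms.getD j 0 : Int) - pvMin ms)) ^ 2 + ((it.getD j 0 - pvMin it)) ^ 2 + ((ag.getD j 0 - pvMin ag)) ^ 2, (j : Int)),
                (ms.getD j 0, it.getD j 0, ag.getD j 0)) best).take 20) [] (List.range n)
          = List.foldl (fun best j => (pvInsB (pvE ms it ag j) best).take 20) [] (List.range n) := rfl
        _ = List.foldl (fun b e => (pvInsB e b).take 20) (([] : List _).take 20) ((List.range n).map (pvE ms it ag)) := by
              rw [List.foldl_map]; rfl
        _ = F.take 20 := pvFold_take _ _
    rw [hB]
    have hA : PySem.List.sorted (PySem.List.enumerate ((PySem.List.pyRange 0 (ms.length : Int)).foldl (fun acc i =>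
        acc ++ [(PySem.List.pyGetD ms i 0 - pvMin ms) ^ 2
              + (PySem.List.pyGetD it i 0 - pvMin it) ^ 2
              + (PySem.List.pyGetD ag i 0 - pvMin ag) ^ 2]) [])) (fun x => x.2) = F.map pvG := by
      rw [pvInA_eq, PySem.List.sorted_eq_foldl_insertBy]
      have := pvFold_parallel ms it ag (List.range n) (List.pairwise_lt_range) []
        (by intro e he; simp at he)
      simpa using this
    rw [hA, ← List.map_take, PySem.List.foldl_append_singleton_eq_map (fun p : Int × Int => p.1)]
    have hmem : ∀ e ∈ F.take 20, ∃ j : Nat, j < n ∧ e = pvE ms it ag j := by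
      intro e he
      have := pvMem_fold _ _ (List.take_subset 20 F he)
      rcases this with h | h
      · simp at h
      · obtain ⟨j, hj, hje⟩ := List.mem_map.mp h
        exact ⟨j, by simpa using hj, hje.symm⟩
    simp only [List.nil_append, List.map_map]
    congr 1
    · apply List.map_congr_left
      intro e he
      obtain ⟨j, hj, rfl⟩ := hmem e he
      simp [Function.comp, pvG, pvE, PySem.List.pyGetD_natCast]
    congr 1
    · apply List.map_congr_left
      intro e he
      obtain ⟨j, hj, rfl⟩ := hmem e he
      simp [Function.comp, pvG, pvE, PySem.List.pyGetD_natCast]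
    congr 1
    apply List.map_congr_left
    intro e he
    obtain ⟨j, hj, rfl⟩ := hmem e he
    simp [Function.comp, pvG, pvE, PySem.List.pyGetD_natCast]
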